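-- pv_equiv track=rewrite | github.com/JamiesonChase/Plagarism-Detection-tool | secondComparisonAlgorithm/modules/comparison/comparison.py | determineHBlocks
-- ===== SOURCE A (Python) =====
-- def determineHBlocks(sortedLineMatches, dict):
--     # Get blocks of text to be highlighted from the sorted list of line matches
--     tempBlock = []
--     hBlocks = []
--     count = 0
--     blocks = []
--
--     # values and keys are for testing to watch dict_values and keys
--     values = dict.values()
--     keys = dict.keys()
--     # since values is not subscriptable create a list of the sorted lines number of matches
--     res = [dict[i] for i in sortedLineMatches]
--     # res takes the amount of all the matches and puts them in a list relevent to the values location in the sortedLineMatches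
--     for i in range(0, len(sortedLineMatches)):
--         if res[i] != 0:   # if i is not a gap line
--             tempBlock.append(sortedLineMatches[i])   # append ith element of sortedLineMatches to tempBlock
--             if (count != 4):       # high number will shorten the blocks
--                 # count sets the blocksize to count + 1
--                     # ie. count = 3 will produce blocks like [1,4],[5,8]
--                 count += 1
--                 continue
--             else:
--                 # when block size is reached clear the count and append the block to tempBlock
--                 count = 0
--                 hBlocks.append(tempBlock) # end the block, append tempBlock to highlightBlocks variable: hBlocks
--                 tempBlock = [] # clear tempBlock
--         else:  # if there is a gap
--             if len(tempBlock) != 0:  # if tempBlock is not already empty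
--                 hBlocks.append(tempBlock)   # ends the block by appending tempBlock to hBlocks
--                 count = 0
--                 tempBlock = []
--     # out of lines, end the block
--     hBlocks.append(tempBlock) # completes list of blocks ie. ([1,2,3,4],[5,6,7,8],[11,12,13,14],[16,17])
--     for i in hBlocks:
--         if len(i) == 0: continue        # if hBlocks is empty continue to return
--         blocks.append([i[0], i[-1]])    # append first and last element of each ith hBlock
--
--     return blocks
-- ===== SOURCE B (Python) =====
-- def determineHBlocks(sortedLineMatches, dict):
--     # Same highlight blocks, computed by extracting maximal runs of matched
--     # lines (non-zero match count) and chunking each run into groups of 5.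
--     res = [dict[i] for i in sortedLineMatches]
--     blocks = []
--     n = len(res)
--     i = 0
--     while i < n:
--         if res[i] == 0:
--             i += 1
--         else:
--             j = i
--             while j < n and res[j] != 0:
--                 j += 1
--             run = sortedLineMatches[i:j]
--             for k in range(0, len(run), 5):
--                 chunk = run[k:k + 5]
--                 blocks.append([chunk[0], chunk[-1]])
--             i = j
--     return blocks
-- ===== Notes on version B (the rewrite author's own statement) =====
-- stated objective: alternative
-- what changed: Replaces A's single stateful counter/tempBlock pass plus a second endpoint-extraction pass over hBlocks by extracting maximal runs of consecutive matched lines and slicing each run into chunks of 5, emitting each chunk's endpoints directly.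
import Mathlib
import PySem

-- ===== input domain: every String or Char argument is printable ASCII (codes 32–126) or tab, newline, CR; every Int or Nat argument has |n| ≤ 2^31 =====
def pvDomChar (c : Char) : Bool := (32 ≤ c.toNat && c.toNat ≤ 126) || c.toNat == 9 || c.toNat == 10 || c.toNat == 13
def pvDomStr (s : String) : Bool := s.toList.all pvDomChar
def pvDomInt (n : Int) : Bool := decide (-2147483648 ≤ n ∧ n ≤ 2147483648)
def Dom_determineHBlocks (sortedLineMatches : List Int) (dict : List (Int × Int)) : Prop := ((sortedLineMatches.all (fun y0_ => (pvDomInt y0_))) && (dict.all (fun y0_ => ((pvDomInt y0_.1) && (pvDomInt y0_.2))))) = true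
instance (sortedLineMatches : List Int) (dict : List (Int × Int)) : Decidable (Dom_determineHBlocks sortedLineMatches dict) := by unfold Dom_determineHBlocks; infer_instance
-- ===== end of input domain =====

-- B replaces A's stateful counter/tempBlock pass plus a second endpoint-extraction pass
-- by a run-extraction-then-chunk-into-5s decomposition; same values, same O(n) cost.

-- ===== PORT A =====
-- one iteration of A's first for-loop: state (tempBlock, hBlocks, count)
def pvStepA (s res : List Int) (st : List Int × List (List Int) × Int) (i : Nat) :
    List Int × List (List Int) × Int :=
  let (tempBlock, hBlocks, count) := st
  if res.getD i 0 ≠ 0 then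
    let tempBlock := tempBlock ++ [s.getD i 0]
    if count ≠ 4 then (tempBlock, hBlocks, count + 1)
    else ([], hBlocks ++ [tempBlock], 0)
  else
    if tempBlock.length ≠ 0 then ([], hBlocks ++ [tempBlock], 0)
    else (tempBlock, hBlocks, count)

def determineHBlocks (sortedLineMatches : List Int) (dict : List (Int × Int)) : List (List Int) :=
  -- res = [dict[i] for i in sortedLineMatches]; under Pre_ every lookup succeeds, so getD is exact
  let res := sortedLineMatches.map (fun i => PySem.Dict.getD (PySem.Dict.mk dict) i 0)
  let st := (List.range sortedLineMatches.length).foldl (pvStepA sortedLineMatches res) ([], [], 0)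
  let hBlocks := st.2.1 ++ [st.1]
  -- second loop: i[0] and i[-1] are ported as headD/getLastD, exact on the nonempty blocks it reads
  hBlocks.foldl (fun blocks b => if b.length = 0 then blocks else blocks ++ [[b.headD 0, b.getLastD 0]]) []

-- ===== PORT B =====
-- run[k:k+5] chunking loop of B: slices have nonneg bounds, ported as take/drop (exact)
def pvChunk : List Int → List (List Int)
  | [] => []
  | x :: rest =>
    let chunk := (x :: rest).take 5
    [chunk.headD 0, chunk.getLastD 0] :: pvChunk ((x :: rest).drop 5)
  termination_by l => l.length
  decreasing_by simp

-- inner while of B: advance j while j < n and res[j] != 0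
def pvRunEnd (res : List Int) (n j : Nat) : Nat :=
  if h : j < n ∧ res.getD j 0 ≠ 0 then pvRunEnd res n (j + 1) else j
  termination_by n - j
  decreasing_by omega

-- needed by pvLoopB's termination proof
theorem pvRunEnd_ge (res : List Int) (n j : Nat) : j ≤ pvRunEnd res n j := by
  unfold pvRunEnd
  split
  · have := pvRunEnd_ge res n (j + 1); omega
  · exact Nat.le_refl j
  termination_by n - j

theorem pvRunEnd_gt (res : List Int) (n i : Nat) (h : i < n) (hv : res.getD i 0 ≠ 0) :
    i < pvRunEnd res n i := by
  rw [pvRunEnd, dif_pos ⟨h, hv⟩]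
  have := pvRunEnd_ge res n (i + 1); omega

-- outer while loop of B
def pvLoopB (s res : List Int) (n i : Nat) (blocks : List (List Int)) : List (List Int) :=
  if h : i < n then
    if hv : res.getD i 0 = 0 then pvLoopB s res n (i + 1) blocks
    else
      let j := pvRunEnd res n i
      -- run = sortedLineMatches[i:j] with 0 ≤ i ≤ j: the slice is drop/take (exact)
      let run := (s.drop i).take (j - i)
      pvLoopB s res n j (blocks ++ pvChunk run)
  else blocks
  termination_by n - i
  decreasing_by
  · omega
  · have := pvRunEnd_gt res n i h hv; omega

def determineHBlocks_alt (sortedLineMatches : List Int) (dict : List (Int × Int)) : List (List Int) :=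
  let res := sortedLineMatches.map (fun i => PySem.Dict.getD (PySem.Dict.mk dict) i 0)
  pvLoopB sortedLineMatches res res.length 0 []

-- ===== PRECONDITION & SPEC =====
-- Pre_ excludes exactly the inputs where [dict[i] for i in sortedLineMatches] raises KeyError
-- (a line number missing from dict); B raises there too.
def Pre_determineHBlocks (sortedLineMatches : List Int) (dict : List (Int × Int)) : Prop :=
  ∀ x ∈ sortedLineMatches, (PySem.Dict.get? (PySem.Dict.mk dict) x).isSome = true
instance (sortedLineMatches : List Int) (dict : List (Int × Int)) :
    Decidable (Pre_determineHBlocks sortedLineMatches dict) := by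
  unfold Pre_determineHBlocks; infer_instance

def pvWitness_determineHBlocks : List Int × (List (Int × Int)) :=
  ([1, 2, 3, 4, 5, 6, 8], [(1, 2), (2, 1), (3, 1), (4, 1), (5, 1), (6, 3), (8, 0)])

def Spec_determineHBlocks (sortedLineMatches : List Int) (dict : List (Int × Int)) (out : List (List Int)) : Prop := out = determineHBlocks_alt sortedLineMatches dict
instance (sortedLineMatches : List Int) (dict : List (Int × Int)) (out : List (List Int)) : Decidable (Spec_determineHBlocks sortedLineMatches dict out) := by unfold Spec_determineHBlocks; infer_instance

-- ===== CLAIM (what is proved, stated in full; the proofs are below) =====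
def Claim_equal_determineHBlocks : Prop := ∀ (sortedLineMatches : List Int) (dict : List (Int × Int)), Dom_determineHBlocks sortedLineMatches dict → Pre_determineHBlocks sortedLineMatches dict → Spec_determineHBlocks sortedLineMatches dict (determineHBlocks sortedLineMatches dict)

-- ===== LEMMAS AND PROOFS =====

-- endpoints of one (possibly empty) block
def pvEndp (b : List Int) : List (List Int) :=
  if b = [] then [] else [[b.headD 0, b.getLastD 0]]

-- common intermediate form: consume (line, matchcount) pairs with a pending partial block t
def pvAux : List Int → List (Int × Int) → List (List Int)
  | t, [] => pvEndp t
  | t, (l, v) :: rest =>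
    if v ≠ 0 then
      if t.length = 4 then [(t ++ [l]).headD 0, l] :: pvAux [] rest
      else pvAux (t ++ [l]) rest
    else pvEndp t ++ pvAux [] rest

-- A's second loop is flatMap pvEndp
theorem pv_foldl_endp : ∀ (hs : List (List Int)) (acc : List (List Int)),
    hs.foldl (fun blocks b => if b.length = 0 then blocks else blocks ++ [[b.headD 0, b.getLastD 0]]) acc
      = acc ++ hs.flatMap pvEndp := by
  intro hs
  induction hs with
  | nil => intro acc; simp
  | cons b hs ih =>
    intro acc
    simp only [List.foldl_cons, List.flatMap_cons, ih]
    by_cases hb : b = []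
    · subst hb; simp [pvEndp]
    · rw [if_neg (by simpa using hb)]
      simp [pvEndp, hb]

-- fold over range with getD-indexing = fold over the zipped lists
theorem pv_foldl_range_zip {σ : Type} (g : σ → Int → Int → σ) :
    ∀ (s res : List Int) (init : σ), res.length = s.length →
    (List.range s.length).foldl (fun st i => g st (s.getD i 0) (res.getD i 0)) init
      = (s.zip res).foldl (fun st p => g st p.1 p.2) init := by
  intro s
  induction s with
  | nil => intro res init _; simp
  | cons a s ih =>
    intro res init h
    cases res with
    | nil => simp at h
    | cons b res =>
      simp only [List.length_cons, List.range_succ_eq_map, List.foldl_cons, List.foldl_map,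
        List.getD_cons_succ, List.getD_cons_zero, List.zip_cons_cons]
      exact ih res (g init a b) (by simpa using h)

-- A's per-pair step
def pvStepZ (st : List Int × List (List Int) × Int) (p : Int × Int) :
    List Int × List (List Int) × Int :=
  let (tempBlock, hBlocks, count) := st
  if p.2 ≠ 0 then
    let tempBlock := tempBlock ++ [p.1]
    if count ≠ 4 then (tempBlock, hBlocks, count + 1)
    else ([], hBlocks ++ [tempBlock], 0)
  else
    if tempBlock.length ≠ 0 then ([], hBlocks ++ [tempBlock], 0)
    else (tempBlock, hBlocks, count)

theorem pv_foldA_eq_foldZ (s res : List Int) (init : List Int × List (List Int) × Int)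
    (h : res.length = s.length) :
    (List.range s.length).foldl (pvStepA s res) init = (s.zip res).foldl pvStepZ init := by
  exact pv_foldl_range_zip (fun st l v => pvStepZ st (l, v)) s res init h

-- A's main fold, characterised by pvAux
theorem pv_stepZ_aux : ∀ (ps : List (Int × Int)) (t : List Int) (h : List (List Int)),
    t.length ≤ 4 →
    (((ps.foldl pvStepZ (t, h, (t.length : Int))).2.1
        ++ [(ps.foldl pvStepZ (t, h, (t.length : Int))).1]).flatMap pvEndp)
      = h.flatMap pvEndp ++ pvAux t ps := by
  intro ps
  induction ps with
  | nil =>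
    intro t h _
    simp [pvAux, List.flatMap_append]
  | cons p rest ih =>
    intro t h ht
    obtain ⟨l, v⟩ := p
    by_cases hv : v ≠ 0
    · by_cases h4 : t.length = 4
      · have hc : ¬ ((t.length : Int) ≠ 4) := by omega
        have hstep : pvStepZ (t, h, (t.length : Int)) (l, v) = ([], h ++ [t ++ [l]], 0) := by
          simp [pvStepZ, hv, hc]
        have h0 : (0 : Int) = (([] : List Int).length : Int) := by simp
        rw [List.foldl_cons, hstep, h0, ih [] (h ++ [t ++ [l]]) (by simp)]
        have haux : pvAux t ((l, v) :: rest) = [(t ++ [l]).headD 0, l] :: pvAux [] rest := by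
          simp only [pvAux]; rw [if_pos hv, if_pos h4]
        rw [haux]
        have hne : t ++ [l] ≠ [] := by simp
        simp [pvEndp, hne, List.flatMap_append, List.getLast?_concat]
      · have hc : (t.length : Int) ≠ 4 := by omega
        have hstep : pvStepZ (t, h, (t.length : Int)) (l, v) = (t ++ [l], h, (t.length : Int) + 1) := by
          simp [pvStepZ, hv, hc]
        have hlen : ((t.length : Int) + 1) = (((t ++ [l]).length : Int)) := by simp
        rw [List.foldl_cons, hstep, hlen, ih (t ++ [l]) h (by simp; omega)]
        have haux : pvAux t ((l, v) :: rest) = pvAux (t ++ [l]) rest := by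
          simp only [pvAux]; rw [if_pos hv, if_neg h4]
        rw [haux]
    · push_neg at hv
      by_cases hne : t = []
      · subst hne
        have hstep : pvStepZ (([] : List Int), h, ((0:Nat) : Int)) (l, v) = ([], h, 0) := by
          simp [pvStepZ, hv]
        rw [List.foldl_cons]
        simp only [List.length_nil] at hstep ⊢
        rw [hstep]
        have h0 : (0 : Int) = (([] : List Int).length : Int) := by simp
        rw [h0, ih [] h (by simp)]
        have haux : pvAux ([] : List Int) ((l, v) :: rest) = pvAux [] rest := by
          simp only [pvAux]; rw [if_neg (by simp [hv])]; simp [pvEndp]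
        rw [haux]
      · have hstep : pvStepZ (t, h, (t.length : Int)) (l, v) = ([], h ++ [t], 0) := by
          simp [pvStepZ, hv, hne]
        have h0 : (0 : Int) = (([] : List Int).length : Int) := by simp
        rw [List.foldl_cons, hstep, h0, ih [] (h ++ [t]) (by simp)]
        have haux : pvAux t ((l, v) :: rest) = pvEndp t ++ pvAux [] rest := by
          simp only [pvAux]; rw [if_neg (by simp [hv])]
        rw [haux]
        simp [List.flatMap_append, pvEndp, hne]

-- pvRunEnd stays ≤ n, its interior is nonzero, and it stops at n or at a zero
theorem pvRunEnd_le (res : List Int) (n j : Nat) (hj : j ≤ n) : pvRunEnd res n j ≤ n := by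
  rw [pvRunEnd]
  split
  · next h => exact pvRunEnd_le res n (j + 1) h.1
  · exact hj
  termination_by n - j
  decreasing_by next h _ => omega

theorem pvRunEnd_mem (res : List Int) (n j : Nat) :
    ∀ k, j ≤ k → k < pvRunEnd res n j → res.getD k 0 ≠ 0 := by
  intro k hk hlt
  rw [pvRunEnd] at hlt
  revert hlt
  split
  · next h =>
    intro hlt
    rcases Nat.eq_or_lt_of_le hk with rfl | h'
    · exact h.2
    · exact pvRunEnd_mem res n (j + 1) k h' hlt
  · intro hlt; omega
  termination_by n - j
  decreasing_by next h _ _ => omega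

theorem pvRunEnd_stop (res : List Int) (n j : Nat) (hj : j ≤ n) :
    pvRunEnd res n j = n ∨ res.getD (pvRunEnd res n j) 0 = 0 := by
  rw [pvRunEnd]
  split
  · next h => exact pvRunEnd_stop res n (j + 1) h.1
  · next h =>
    push_neg at h
    by_cases hjn : j < n
    · exact Or.inr (h hjn)
    · exact Or.inl (by omega)
  termination_by n - j
  decreasing_by next h _ => omega

-- a run of at most 5 lines is a single block
theorem pvChunk_small (b : List Int) (hb : b.length ≤ 5) : pvChunk b = pvEndp b := by
  cases b with
  | nil => simp [pvChunk, pvEndp]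
  | cons x rest =>
    rw [pvChunk]
    simp only [List.take_of_length_le hb, List.drop_eq_nil_of_le hb]
    simp [pvChunk, pvEndp]

theorem pv_length_eq_four (t : List Int) (h : t.length = 4) :
    ∃ a b c d, t = [a, b, c, d] := by
  match t, h with
  | [a, b, c, d], _ => exact ⟨a, b, c, d, rfl⟩

-- splitting off a full block of 5
theorem pvChunk_five (t : List Int) (l : Int) (m : List Int) (h4 : t.length = 4) :
    pvChunk (t ++ l :: m) = [(t ++ [l]).headD 0, l] :: pvChunk m := by
  obtain ⟨a, b, c, d, rfl⟩ := pv_length_eq_four t h4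
  simp [pvChunk]

-- chunking a nonzero run followed by a gap (or the end) equals elementwise pvAux
theorem pvAux_run : ∀ (r : List (Int × Int)) (t : List Int) (rest : List (Int × Int)),
    t.length ≤ 4 → (∀ p ∈ r, p.2 ≠ 0) → (∀ p, rest.head? = some p → p.2 = 0) →
    pvAux t (r ++ rest) = pvChunk (t ++ r.map Prod.fst) ++ pvAux [] rest := by
  intro r
  induction r with
  | nil =>
    intro t rest ht _ hrest
    simp only [List.map_nil, List.append_nil, List.nil_append]
    rw [pvChunk_small t (by omega)]
    cases rest with
    | nil => simp [pvAux, pvEndp]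
    | cons p rest' =>
      obtain ⟨l, v⟩ := p
      have hv : v = 0 := hrest (l, v) rfl
      subst hv
      simp [pvAux, pvEndp]
  | cons p r'' ih =>
    intro t rest ht hr hrest
    obtain ⟨l, v⟩ := p
    have hv : v ≠ 0 := hr (l, v) (by simp)
    by_cases h4 : t.length = 4
    · simp only [List.cons_append, pvAux, hv, if_pos h4, if_true, ne_eq, not_false_eq_true]
      rw [ih [] rest (by simp) (fun q hq => hr q (by simp [hq])) hrest]
      simp only [List.map_cons, pvChunk_five t l (r''.map Prod.fst) h4]
      simp
    · simp only [List.cons_append, pvAux, hv, if_neg h4, if_true, ne_eq, not_false_eq_true]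
      rw [ih (t ++ [l]) rest (by simp; omega) (fun q hq => hr q (by simp [hq])) hrest]
      simp

-- B's outer loop, characterised by pvAux
theorem pv_loopB_aux (s res : List Int) (hlen : res.length = s.length)
    (i : Nat) (acc : List (List Int)) (hi : i ≤ res.length) :
    pvLoopB s res res.length i acc = acc ++ pvAux [] ((s.zip res).drop i) := by
  have hzlen : (s.zip res).length = res.length := by simp [hlen]
  rw [pvLoopB]
  split
  · next hilt =>
    have hidx : i < (s.zip res).length := by omega
    have hdrop : (s.zip res).drop i = (s.zip res)[i] :: (s.zip res).drop (i + 1) :=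
      List.drop_eq_getElem_cons hidx
    have hzi : (s.zip res)[i] = (s[i]'(by omega), res[i]'(by omega)) := List.getElem_zip
    split
    · next hv =>
      rw [pv_loopB_aux s res hlen (i + 1) acc (by omega)]
      have hres : res.getD i 0 = res[i]'(by omega) := List.getD_eq_getElem res 0 (by omega)
      rw [hdrop, hzi, pvAux]
      rw [hres] at hv
      simp [hv, pvEndp]
    · next hv =>
      have hj := pvRunEnd_gt res res.length i hilt hv
      have hjle := pvRunEnd_le res res.length i (by omega)
      rw [pv_loopB_aux s res hlen (pvRunEnd res res.length i) (acc ++ pvChunk ((s.drop i).take (pvRunEnd res res.length i - i))) hjle]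
      rw [List.append_assoc]
      congr 1
      -- show pvChunk run ++ pvAux [] (drop j) = pvAux [] (drop i)
      set j := pvRunEnd res res.length i with hjdef
      set r : List (Int × Int) := ((s.zip res).drop i).take (j - i) with hrdef
      have hsplit : (s.zip res).drop i = r ++ (s.zip res).drop j := by
        have hdd : (s.zip res).drop j = ((s.zip res).drop i).drop (j - i) := by
          rw [List.drop_drop]; congr 1; omega
        rw [hrdef, hdd, List.take_append_drop]
      have hrlen : r.length = j - i := by
        rw [hrdef]; simp; omega
      have hmap : r.map Prod.fst = (s.drop i).take (j - i) := by
        rw [hrdef, List.map_take, List.map_drop, List.map_fst_zip (by omega : s.length ≤ res.length)]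
      have hnz : ∀ p ∈ r, p.2 ≠ 0 := by
        intro p hp
        rw [hrdef] at hp
        obtain ⟨k, hk, hpk⟩ := List.getElem_of_mem hp
        have hklen : k < j - i := by
          have h2 := hk
          simp only [List.length_take, List.length_drop, hzlen] at h2
          omega
        have hk2 : (((s.zip res).drop i).take (j - i))[k]'hk
            = (s.zip res)[i + k]'(by omega) := by
          rw [List.getElem_take, List.getElem_drop]
        have hz2 : (s.zip res)[i + k]'(by omega) = (s[i + k]'(by omega), res[i + k]'(by omega)) :=
          List.getElem_zip
        have hnz2 : res.getD (i + k) 0 ≠ 0 :=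
          pvRunEnd_mem res res.length i (i + k) (by omega) (by omega)
        rw [List.getD_eq_getElem res 0 (by omega)] at hnz2
        rw [← hpk, hk2, hz2]
        exact hnz2
      have hgap : ∀ p, ((s.zip res).drop j).head? = some p → p.2 = 0 := by
        intro p hp
        rcases pvRunEnd_stop res res.length i (by omega) with hn | hz
        · rw [← hjdef] at hn
          rw [hn, List.drop_eq_nil_of_le (by omega)] at hp
          simp at hp
        · by_cases hjn : j < res.length
          · rw [List.drop_eq_getElem_cons (by omega : j < (s.zip res).length)] at hp
            simp at hp
            rw [← hp]
            rw [List.getD_eq_getElem res 0 (by omega)] at hz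
            exact hz
          · rw [List.drop_eq_nil_of_le (by omega)] at hp
            simp at hp
        
      rw [hsplit, pvAux_run r [] ((s.zip res).drop j) (by simp) hnz hgap]
      rw [List.nil_append, hmap]
  · next hge =>
    rw [List.drop_eq_nil_of_le (by omega)]
    simp [pvAux, pvEndp]
  termination_by res.length - i
  decreasing_by all_goals omega

-- ===== VERDICT (by name: the statement is the Claim_ definition above) =====
theorem determineHBlocks_spec : Claim_equal_determineHBlocks := by
  intro s d _ _
  unfold Spec_determineHBlocks determineHBlocks determineHBlocks_alt
  dsimp only
  have hlen : (s.map (fun i => PySem.Dict.getD (PySem.Dict.mk d) i 0)).length = s.length := by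
    simp
  set res := s.map (fun i => PySem.Dict.getD (PySem.Dict.mk d) i 0) with hres
  rw [pv_foldA_eq_foldZ s res ([], [], 0) hlen]
  have h0 : (([], [], 0) : List Int × List (List Int) × Int)
      = (([] : List Int), ([] : List (List Int)), ((([] : List Int).length : Int))) := by simp
  rw [pv_foldl_endp, h0, pv_stepZ_aux (s.zip res) [] [] (by simp)]
  rw [pv_loopB_aux s res hlen 0 [] (by omega)]
  simp
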